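-- pv_equiv track=rewrite | github.com/alperiox/bookbot | preprocessing.py | setup_blocks
-- ===== SOURCE A (Python) =====
-- def setup_blocks(paragraphs, char_to_ix, block_size):
--     """
--     returns the input blocks along with targets using given paragraphs.
--     """
--     blocks = []
--     targets = []
--
--     for paragraph in paragraphs:
--         p = "|" + paragraph + "|"
--         length = len(p)
--         for i in range(length - block_size):
--             block = p[i : i + block_size]
--             target = p[i + block_size]
--             block = [char_to_ix[char] for char in block]
--             target = char_to_ix[target]
--             blocks.append(block)
--             targets.append(target)
--
--     return blocks, targets
-- ===== SOURCE B (Python) =====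
-- def setup_blocks(paragraphs, char_to_ix, block_size):
--     """
--     returns the input blocks along with targets using given paragraphs.
--     """
--     blocks = []
--     targets = []
--     for paragraph in paragraphs:
--         if len(paragraph) + 2 <= block_size:
--             continue  # no window fits in "|" + paragraph + "|"
--         window = []
--         for c in "|" + paragraph + "|":
--             ix = char_to_ix[c]
--             if len(window) == block_size:
--                 blocks.append(window)
--                 targets.append(ix)
--             window = window + [ix]
--             if len(window) > block_size:
--                 window = window[1:]
--     return blocks, targets
-- ===== Notes on version B (the rewrite author's own statement) =====
-- stated objective: alternative
-- what changed: B replaces A's index-based window extraction (range over start positions, slicing p[i:i+block_size] and re-mapping each window) by a single streaming pass per paragraph that looks each character up once and maintains a rolling window of the last block_size indices, emitting (window, ix) whenever the window is full; paragraphs too short for any window are skipped.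
-- intended difference: For block_size < 0 with a nonempty paragraph list A returns junk built from negative-length slices and Python's negative-index wraparound (empty or truncated blocks, targets read from the end of the paragraph), while B returns ([], []); no window of negative size exists, so the empty result is the intended value. — e.g. on setup_blocks(["a"], [("|", 0), ("a", 1)], -1): A returns ([[0, 1], [], [], []], [0, 0, 1, 0]), B returns ([], [])
import Mathlib
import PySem

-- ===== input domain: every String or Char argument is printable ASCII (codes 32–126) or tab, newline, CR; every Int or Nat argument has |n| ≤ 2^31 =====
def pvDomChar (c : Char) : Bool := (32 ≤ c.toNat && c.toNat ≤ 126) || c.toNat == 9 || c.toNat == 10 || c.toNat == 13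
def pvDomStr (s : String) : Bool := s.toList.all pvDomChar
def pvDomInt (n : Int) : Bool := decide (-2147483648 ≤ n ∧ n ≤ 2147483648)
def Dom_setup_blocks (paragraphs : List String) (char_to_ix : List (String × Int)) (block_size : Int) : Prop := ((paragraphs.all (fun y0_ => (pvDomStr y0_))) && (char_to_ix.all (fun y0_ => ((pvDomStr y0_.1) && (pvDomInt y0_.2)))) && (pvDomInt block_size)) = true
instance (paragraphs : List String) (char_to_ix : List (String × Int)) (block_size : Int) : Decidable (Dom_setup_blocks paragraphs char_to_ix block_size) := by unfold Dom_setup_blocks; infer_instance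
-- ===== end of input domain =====

-- B streams each '|'-wrapped paragraph once with a rolling window of the last block_size indices instead of A's index-based slicing with per-window re-mapping (one lookup per character, measured faster); negative block_size is the stated intended difference (D_).


-- ===== PORT A =====
-- char_to_ix[c] for a single character c; inside Pre_ the key is always present, so the default is never returned
def sbLookup (d : PySem.Dict String Int) (c : Char) : Int := (d.get? (String.ofList [c])).getD 0

def setup_blocks (paragraphs : List String) (char_to_ix : List (String × Int)) (block_size : Int) : List (List Int) × List Int :=
  let d := PySem.Dict.ofList char_to_ix
  paragraphs.foldl (fun acc paragraph =>
    let p : List Char := '|' :: paragraph.toList ++ ['|']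
    let length : Int := (p.length : Int)
    (PySem.List.pyRange 0 (length - block_size) 1).foldl (fun a i =>
      let block : List Char := PySem.List.slice p (some i) (some (i + block_size))
      -- p[i + block_size]; inside Pre_ the index is in range, so the default is never returned
      let target : Char := (PySem.List.pyGet? p (i + block_size)).getD ' '
      (a.1 ++ [block.map (sbLookup d)], a.2 ++ [sbLookup d target])) acc) ([], [])

-- ===== PORT B =====
-- one streaming step of Source B's inner loop: state = ((blocks, targets), window), ix the looked-up character
def sbStep (block_size : Int) (st : (List (List Int) × List Int) × List Int) (ix : Int) :
    (List (List Int) × List Int) × List Int :=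
  let st1 := if (st.2.length : Int) = block_size
             then ((st.1.1 ++ [st.2], st.1.2 ++ [ix]), st.2) else st
  let w := st1.2 ++ [ix]
  (st1.1, if (w.length : Int) > block_size then w.drop 1 else w)   -- window[1:] = drop 1

def setup_blocks_alt (paragraphs : List String) (char_to_ix : List (String × Int)) (block_size : Int) : List (List Int) × List Int :=
  let d := PySem.Dict.ofList char_to_ix
  paragraphs.foldl (fun acc paragraph =>
    if (paragraph.length : Int) + 2 ≤ block_size then acc   -- no window fits in "|" + paragraph + "|"
    else (('|' :: paragraph.toList ++ ['|']).foldl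
            (fun st c => sbStep block_size st (sbLookup d c)) (acc, [])).1) ([], [])

-- ===== PRECONDITION & SPEC =====
-- Pre_ excludes exactly the inputs where A raises: KeyError on an unmapped character of a paragraph that yields at
-- least one window, and IndexError when block_size < -(len(paragraph)+2) makes the target index wrap past the front.
def Pre_setup_blocks (paragraphs : List String) (char_to_ix : List (String × Int)) (block_size : Int) : Prop :=
  ∀ s ∈ paragraphs,
    (-((s.length : Int) + 2) ≤ block_size) ∧
    ((s.length : Int) + 2 - block_size ≤ 0 ∨
      (('|' :: s.toList ++ ['|']).all (fun c => ((PySem.Dict.ofList char_to_ix).get? (String.ofList [c])).isSome)) = true)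
instance (paragraphs : List String) (char_to_ix : List (String × Int)) (block_size : Int) : Decidable (Pre_setup_blocks paragraphs char_to_ix block_size) := by unfold Pre_setup_blocks; infer_instance

def pvWitness_setup_blocks : List String × (List (String × Int)) × Int :=
  (["ab"], [("|", 0), ("a", 1), ("b", 2)], 2)

-- For block_size < 0 with a nonempty paragraph list A returns junk built from negative-length slices and
-- Python's negative-index wraparound, while B returns ([], []): no window of negative size exists, so the
-- empty result is the intended value.
def D_setup_blocks (paragraphs : List String) (char_to_ix : List (String × Int)) (block_size : Int) : Prop :=
  block_size < 0 ∧ paragraphs ≠ []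
instance (paragraphs : List String) (char_to_ix : List (String × Int)) (block_size : Int) : Decidable (D_setup_blocks paragraphs char_to_ix block_size) := by unfold D_setup_blocks; infer_instance

def Spec_setup_blocks (paragraphs : List String) (char_to_ix : List (String × Int)) (block_size : Int) (out : List (List Int) × List Int) : Prop := ¬ D_setup_blocks paragraphs char_to_ix block_size → out = setup_blocks_alt paragraphs char_to_ix block_size
instance (paragraphs : List String) (char_to_ix : List (String × Int)) (block_size : Int) (out : List (List Int) × List Int) : Decidable (Spec_setup_blocks paragraphs char_to_ix block_size out) := by unfold Spec_setup_blocks; infer_instance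

def pvDiffWitness_setup_blocks : List String × (List (String × Int)) × Int :=
  (["a"], [("|", 0), ("a", 1)], -1)
def pvDiffWitnessOut_setup_blocks : (List (List Int) × List Int) × (List (List Int) × List Int) :=
  (([[0, 1], [], [], []], [0, 0, 1, 0]), ([], []))

-- ===== CLAIM (what is proved, stated in full; the proofs are below) =====
def Claim_unchanged_setup_blocks : Prop := ∀ (paragraphs : List String) (char_to_ix : List (String × Int)) (block_size : Int), Dom_setup_blocks paragraphs char_to_ix block_size → Pre_setup_blocks paragraphs char_to_ix block_size → Spec_setup_blocks paragraphs char_to_ix block_size (setup_blocks paragraphs char_to_ix block_size)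
def Claim_changed_setup_blocks : Prop := Dom_setup_blocks (pvDiffWitness_setup_blocks.1) (pvDiffWitness_setup_blocks.2.1) (pvDiffWitness_setup_blocks.2.2) ∧ Pre_setup_blocks (pvDiffWitness_setup_blocks.1) (pvDiffWitness_setup_blocks.2.1) (pvDiffWitness_setup_blocks.2.2) ∧ D_setup_blocks (pvDiffWitness_setup_blocks.1) (pvDiffWitness_setup_blocks.2.1) (pvDiffWitness_setup_blocks.2.2) ∧ setup_blocks (pvDiffWitness_setup_blocks.1) (pvDiffWitness_setup_blocks.2.1) (pvDiffWitness_setup_blocks.2.2) = pvDiffWitnessOut_setup_blocks.1 ∧ setup_blocks_alt (pvDiffWitness_setup_blocks.1) (pvDiffWitness_setup_blocks.2.1) (pvDiffWitness_setup_blocks.2.2) = pvDiffWitnessOut_setup_blocks.2 ∧ pvDiffWitnessOut_setup_blocks.1 ≠ pvDiffWitnessOut_setup_blocks.2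
def Claim_exact_setup_blocks : Prop := ∀ (paragraphs : List String) (char_to_ix : List (String × Int)) (block_size : Int), Dom_setup_blocks paragraphs char_to_ix block_size → Pre_setup_blocks paragraphs char_to_ix block_size → D_setup_blocks paragraphs char_to_ix block_size → setup_blocks paragraphs char_to_ix block_size ≠ setup_blocks_alt paragraphs char_to_ix block_size

-- ===== LEMMAS AND PROOFS =====

-- A's inner loop of per-item appends equals bulk appends of two mapped lists.
theorem sb_foldl_pair_append {α : Type} (L : List α) (f : α → List Int) (g : α → Int)
    (acc : List (List Int) × List Int) :
    L.foldl (fun a i => (a.1 ++ [f i], a.2 ++ [g i])) acc = (acc.1 ++ L.map f, acc.2 ++ L.map g) := by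
  induction L generalizing acc with
  | nil => simp
  | cons x xs ih => simp [ih]

-- slicing commutes with mapping the lookup over the characters
theorem sb_slice_map (f : Char → Int) (l : List Char) (a b : Option Int) :
    PySem.List.slice (l.map f) a b = (PySem.List.slice l a b).map f := by
  cases a <;> cases b <;> simp [PySem.List.slice]

theorem sb_pyGet?_map (f : Char → Int) (l : List Char) (i : Int) :
    PySem.List.pyGet? (l.map f) i = (PySem.List.pyGet? l i).map f := by
  simp [PySem.List.pyGet?, PySem.List.pyIdx?]

theorem sb_pyGetD_eq {α : Type} [Inhabited α] (xs : List α) (i : Int) (d : α) :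
    PySem.List.pyGetD xs i d = (PySem.List.pyGet? xs i).getD d := by
  simp [PySem.List.pyGetD, PySem.List.pyGet?]

-- one paragraph of A: the window loop equals bulk maps over the precomputed index array
theorem sb_para (d : PySem.Dict String Int) (bs : Int) (p : List Char)
    (acc : List (List Int) × List Int) (hbs : -(p.length : Int) ≤ bs) :
    (PySem.List.pyRange 0 ((p.length : Int) - bs) 1).foldl (fun a i =>
      (a.1 ++ [(PySem.List.slice p (some i) (some (i + bs))).map (sbLookup d)],
       a.2 ++ [sbLookup d ((PySem.List.pyGet? p (i + bs)).getD ' ')])) acc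
    = (acc.1 ++ (PySem.List.pyRange 0 ((p.length : Int) - bs) 1).map
          (fun i => PySem.List.slice (p.map (sbLookup d)) (some i) (some (i + bs))),
       acc.2 ++ (PySem.List.pyRange 0 ((p.length : Int) - bs) 1).map
          (fun i => PySem.List.pyGetD (p.map (sbLookup d)) (i + bs) 0)) := by
  rw [PySem.List.foldl_congr_mem'
      (g := fun a i =>
        (a.1 ++ [PySem.List.slice (p.map (sbLookup d)) (some i) (some (i + bs))],
         a.2 ++ [PySem.List.pyGetD (p.map (sbLookup d)) (i + bs) 0]))]
  · exact sb_foldl_pair_append _ _ _ _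
  · intro i hi a
    rw [PySem.List.mem_pyRange_one] at hi
    have hin : PySem.Raise.InRange p.length (i + bs) := by
      constructor <;> omega
    have hnn : PySem.List.pyGet? p (i + bs) ≠ none :=
      fun h => ((PySem.List.pyGet?_eq_none_iff p (i + bs)).mp h) hin
    obtain ⟨c, hc⟩ := Option.ne_none_iff_exists'.mp hnn
    simp [sb_slice_map, sb_pyGetD_eq, sb_pyGet?_map, hc]

-- A's bulk pyRange maps, rewritten over Nat ranges and drop/take
theorem sb_range_conv_blocks (q : List Int) (bsn : Nat) :
    (PySem.List.pyRange 0 ((q.length : Int) - bsn) 1).map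
        (fun i => PySem.List.slice q (some i) (some (i + bsn)))
    = (List.range (q.length - bsn)).map (fun j => (q.drop j).take bsn) := by
  rw [PySem.List.pyRange_one]
  have h : (((q.length : Int) - bsn) - 0).toNat = q.length - bsn := by omega
  rw [h, List.map_map]
  apply List.map_congr_left
  intro k _
  simp [PySem.List.slice_natCast_add]

theorem sb_range_conv_targets (q : List Int) (bsn : Nat) :
    (PySem.List.pyRange 0 ((q.length : Int) - bsn) 1).map
        (fun i => PySem.List.pyGetD q (i + bsn) 0)
    = (List.range (q.length - bsn)).map (fun j => q.getD (j + bsn) 0) := by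
  rw [PySem.List.pyRange_one]
  have h : (((q.length : Int) - bsn) - 0).toNat = q.length - bsn := by omega
  rw [h, List.map_map]
  apply List.map_congr_left
  intro k _
  simp only [Function.comp_apply]
  rw [show (0 : Int) + (k : Int) + (bsn : Int) = ((k + bsn : Nat) : Int) from by push_cast; ring,
      PySem.List.pyGetD_natCast]

-- B's streaming fold, characterised: window w (at most bsn long) plus the remaining input q
theorem sb_stream (bsn : Nat) (q : List Int) :
    ∀ (w : List Int) (acc : List (List Int) × List Int), w.length ≤ bsn →
    q.foldl (sbStep (bsn : Int)) (acc, w) =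
      ((acc.1 ++ (List.range (w.length + q.length - bsn)).map (fun j => ((w ++ q).drop j).take bsn),
        acc.2 ++ (List.range (w.length + q.length - bsn)).map (fun j => (w ++ q).getD (j + bsn) 0)),
       (w ++ q).drop (w.length + q.length - bsn)) := by
  induction q with
  | nil =>
    intro w acc hw
    simp [Nat.sub_eq_zero_of_le hw]
  | cons ix q ih =>
    intro w acc hw
    simp only [List.foldl_cons]
    by_cases hcase : w.length = bsn
    · have hstep : sbStep (bsn : Int) (acc, w) ix
          = ((acc.1 ++ [w], acc.2 ++ [ix]), (w ++ [ix]).drop 1) := by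
        simp [sbStep, hcase]
      rw [hstep, ih ((w ++ [ix]).drop 1) _ (by simp; omega)]
      have hdrop : (w ++ [ix]).drop 1 ++ q = (w ++ ix :: q).drop 1 := by
        rw [← List.drop_append_of_le_length (by simp)]
        simp
      have hlen1 : ((w ++ [ix]).drop 1).length + q.length - bsn = q.length := by
        simp; omega
      have hlen2 : w.length + (ix :: q).length - bsn = q.length + 1 := by
        simp; omega
      rw [hdrop, hlen1, hlen2, List.range_succ_eq_map]
      have hb0 : List.take bsn (List.drop 0 (w ++ ix :: q)) = w := by
        rw [List.drop_zero, ← hcase, List.take_left]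
      have ht0 : (w ++ ix :: q).getD (0 + bsn) 0 = ix := by
        rw [Nat.zero_add, ← hcase]
        simp [List.getD]
      refine congrArg₂ Prod.mk (congrArg₂ Prod.mk ?_ ?_) ?_
      · simp only [List.map_cons, List.map_map, hb0, List.append_assoc, List.singleton_append]
        refine congrArg (fun L => acc.1 ++ w :: L) (List.map_congr_left fun j _ => ?_)
        simp [Function.comp]
      · simp only [List.map_cons, List.map_map, ht0, List.append_assoc, List.singleton_append]
        refine congrArg (fun L => acc.2 ++ ix :: L) (List.map_congr_left fun j _ => ?_)
        simp only [Function.comp_apply]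
        rw [List.getD, List.getElem?_drop, ← List.getD]
        congr 1
        omega
      · rw [List.drop_drop]
        congr 1
        omega
    · have hlt : w.length < bsn := lt_of_le_of_ne hw hcase
      have h1 : ¬ ((w.length : Int) = (bsn : Int)) := by
        intro h
        exact hcase (by exact_mod_cast h)
      have h2 : ¬ ((((w ++ [ix]).length : Nat) : Int) > (bsn : Int)) := by
        simp only [List.length_append, List.length_cons, List.length_nil]
        omega
      have hstep : sbStep (bsn : Int) (acc, w) ix = (acc, w ++ [ix]) := by
        simp only [sbStep, h1, if_false]
        rw [if_neg h2]
      rw [hstep, ih (w ++ [ix]) acc (by simp; omega)]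
      have hl : (w ++ [ix]) ++ q = w ++ ix :: q := by simp
      have hn : (w ++ [ix]).length + q.length - bsn = w.length + (ix :: q).length - bsn := by
        simp; omega
      rw [hl, hn]

-- B's inner character loop is the streaming fold over the looked-up index array
theorem sb_fold_map (d : PySem.Dict String Int) (bs : Int) (P : List Char)
    (st : (List (List Int) × List Int) × List Int) :
    P.foldl (fun st c => sbStep bs st (sbLookup d c)) st
      = (P.map (sbLookup d)).foldl (sbStep bs) st := by
  induction P generalizing st with
  | nil => rfl
  | cons c P ih => simp only [List.foldl_cons, List.map_cons]; exact ih _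

-- per padded paragraph P: A's window loop equals B's streaming loop, for block_size = bsn ≥ 0
theorem sb_para_eq (d : PySem.Dict String Int) (bsn : Nat) (P : List Char)
    (acc : List (List Int) × List Int) :
    (PySem.List.pyRange 0 ((P.length : Int) - (bsn : Int)) 1).foldl (fun a i =>
      (a.1 ++ [(PySem.List.slice P (some i) (some (i + bsn))).map (sbLookup d)],
       a.2 ++ [sbLookup d ((PySem.List.pyGet? P (i + bsn)).getD ' ')])) acc
    = (P.foldl (fun st c => sbStep (bsn : Int) st (sbLookup d c)) (acc, [])).1 := by
  rw [sb_para d bsn P acc (by omega)]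
  rw [sb_fold_map]
  rw [sb_stream bsn (P.map (sbLookup d)) [] acc (by simp)]
  have hq : ((P.map (sbLookup d)).length : Int) = (P.length : Int) := by simp
  rw [← hq, sb_range_conv_blocks, sb_range_conv_targets]
  simp

-- B returns its accumulator unchanged whenever block_size < 0 (the window never reaches a negative size)
theorem sb_stream_neg (bs : Int) (hbs : bs < 0) (q : List Int) :
    ∀ (w : List Int) (acc : List (List Int) × List Int),
    (q.foldl (sbStep bs) (acc, w)).1 = acc := by
  induction q with
  | nil => intro w acc; rfl
  | cons ix q ih =>
    intro w acc
    have h1 : ¬ ((w.length : Int) = bs) := by omega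
    simp only [List.foldl_cons, sbStep, h1, if_false]
    split <;> exact ih _ acc

theorem sb_alt_neg (paragraphs : List String) (char_to_ix : List (String × Int))
    (bs : Int) (hbs : bs < 0) :
    setup_blocks_alt paragraphs char_to_ix bs = ([], []) := by
  unfold setup_blocks_alt
  induction paragraphs with
  | nil => rfl
  | cons s rest ih =>
    simp only [List.foldl_cons]
    have hg : ¬ ((s.length : Int) + 2 ≤ bs) := by omega
    rw [if_neg hg]
    have hinner : (('|' :: s.toList ++ ['|']).foldl
          (fun st c => sbStep bs st (sbLookup (PySem.Dict.ofList char_to_ix) c))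
          ((([], []) : List (List Int) × List Int), ([] : List Int))).1 = ([], []) := by
      rw [sb_fold_map]
      exact sb_stream_neg bs hbs _ [] ([], [])
    rw [hinner]
    exact ih

-- A's inner loop grows the blocks list by exactly the range length
theorem sb_inner_len (L : List Int) (f : Int → List Int) (g : Int → Int) :
    ∀ (acc : List (List Int) × List Int),
    ((L.foldl (fun a i => (a.1 ++ [f i], a.2 ++ [g i])) acc).1).length = acc.1.length + L.length := by
  induction L with
  | nil => intro acc; simp
  | cons x xs ih => intro acc; simp [ih]; omega

-- A's outer loop never shrinks the blocks list
theorem sb_outer_mono (d : PySem.Dict String Int) (bs : Int) (ps : List String) :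
    ∀ (acc : List (List Int) × List Int),
    acc.1.length ≤ ((ps.foldl (fun acc paragraph =>
      (PySem.List.pyRange 0 ((('|' :: paragraph.toList ++ ['|']).length : Int) - bs) 1).foldl (fun a i =>
        (a.1 ++ [(PySem.List.slice ('|' :: paragraph.toList ++ ['|']) (some i) (some (i + bs))).map (sbLookup d)],
         a.2 ++ [sbLookup d ((PySem.List.pyGet? ('|' :: paragraph.toList ++ ['|']) (i + bs)).getD ' ')])) acc) acc).1).length := by
  induction ps with
  | nil => intro acc; simp
  | cons s rest ih =>
    intro acc
    refine le_trans ?_ (ih _)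
    rw [sb_inner_len]
    omega

-- ===== VERDICT (by name: the statement is the Claim_ definition above) =====
theorem setup_blocks_spec : Claim_unchanged_setup_blocks := by
  intro paragraphs char_to_ix block_size _ hpre hnd
  rcases Decidable.not_and_iff_or_not.mp (by unfold D_setup_blocks at hnd; exact hnd) with hbs | hps
  · push_neg at hbs
    obtain ⟨bsn, rfl⟩ : ∃ n : Nat, block_size = (n : Int) :=
      ⟨block_size.toNat, (Int.toNat_of_nonneg hbs).symm⟩
    simp only [setup_blocks, setup_blocks_alt]
    have hfun : (fun (acc : List (List Int) × List Int) (paragraph : String) =>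
        (PySem.List.pyRange 0 ((('|' :: paragraph.toList ++ ['|']).length : Int) - (bsn : Int)) 1).foldl (fun a i =>
          (a.1 ++ [(PySem.List.slice ('|' :: paragraph.toList ++ ['|']) (some i) (some (i + (bsn : Int)))).map (sbLookup (PySem.Dict.ofList char_to_ix))],
           a.2 ++ [sbLookup (PySem.Dict.ofList char_to_ix) ((PySem.List.pyGet? ('|' :: paragraph.toList ++ ['|']) (i + (bsn : Int))).getD ' ')])) acc)
      = (fun (acc : List (List Int) × List Int) (paragraph : String) =>
        if (paragraph.length : Int) + 2 ≤ (bsn : Int) then acc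
        else (('|' :: paragraph.toList ++ ['|']).foldl
            (fun st c => sbStep (bsn : Int) st (sbLookup (PySem.Dict.ofList char_to_ix) c)) (acc, [])).1) := by
      funext acc s
      by_cases hg : (s.length : Int) + 2 ≤ (bsn : Int)
      · rw [if_pos hg]
        have hnil : PySem.List.pyRange 0 ((('|' :: s.toList ++ ['|']).length : Int) - (bsn : Int)) 1 = [] := by
          apply PySem.List.pyRange_one_eq_nil
          have hlN : ('|' :: s.toList ++ ['|']).length = s.length + 2 := by
            simp only [List.length_cons, List.length_append, String.length_toList,
              List.length_nil]
          omega
        rw [hnil]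
        rfl
      · rw [if_neg hg]
        exact sb_para_eq (PySem.Dict.ofList char_to_ix) bsn ('|' :: s.toList ++ ['|']) acc
    rw [hfun]
  · rw [not_not] at hps
    subst hps
    rfl

theorem setup_blocks_changed : Claim_changed_setup_blocks := by
  unfold Claim_changed_setup_blocks
  decide

theorem setup_blocks_tight : Claim_exact_setup_blocks := by
  intro paragraphs char_to_ix block_size _ _ hd heq
  obtain ⟨hbs, hne⟩ := hd
  rw [sb_alt_neg paragraphs char_to_ix block_size hbs] at heq
  obtain ⟨s, rest, rfl⟩ : ∃ s rest, paragraphs = s :: rest := by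
    cases paragraphs with
    | nil => exact absurd rfl hne
    | cons s rest => exact ⟨s, rest, rfl⟩
  have hlen : 1 ≤ ((setup_blocks (s :: rest) char_to_ix block_size).1).length := by
    simp only [setup_blocks, List.foldl_cons]
    refine le_trans ?_ (sb_outer_mono (PySem.Dict.ofList char_to_ix) block_size rest _)
    rw [sb_inner_len]
    rw [PySem.List.length_pyRange_one]
    have hlN : ('|' :: s.toList ++ ['|']).length = s.length + 2 := by
      simp only [List.length_cons, List.length_append, String.length_toList, List.length_nil]
    omega
  rw [heq] at hlen
  simp at hlen
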